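-- pv_equiv track=rewrite | github.com/DreamFields/Claw | skills/bilibili-notes/scripts/extract_subtitles.py | select_best_subtitle
-- ===== SOURCE A (Python) =====
-- def select_best_subtitle(subtitles: list) -> dict | None:
--     """
--     Select the best subtitle from the list.
--     Priority: zh-CN > zh-Hans > zh > en > first available.
--     """
--     if not subtitles:
--         return None
--
--     priority = ["zh-CN", "zh-Hans", "zh", "ai-zh", "en", "ai-en"]
--
--     for lang in priority:
--         for sub in subtitles:
--             lan = sub.get("lan", "")
--             if lan == lang or lan.startswith(lang):
--                 return sub
--
--     # Fallback to first
--     return subtitles[0]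
-- ===== SOURCE B (Python) =====
-- def select_best_subtitle(subtitles: list) -> dict | None:
--     """
--     Select the best subtitle from the list.
--     Priority: zh-CN > zh-Hans > zh > en > first available.
--     """
--     if not subtitles:
--         return None
--
--     priority = ["zh-CN", "zh-Hans", "zh", "ai-zh", "en", "ai-en"]
--
--     def rank(sub):
--         lan = sub.get("lan", "")
--         for i, lang in enumerate(priority):
--             if lan == lang or lan.startswith(lang):
--                 return i
--         return len(priority)
--
--     # min is stable: ties (and the no-match case, where every rank is
--     # len(priority)) resolve to the first subtitle, matching the fallback.
--     return min(subtitles, key=rank)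
-- ===== Notes on version B (the rewrite author's own statement) =====
-- stated objective: simpler
-- what changed: Replaces the priority-outer/subtitle-inner nested scan (with a separate fallback return) by a rank key per subtitle and a single stable min over the list, which subsumes the fallback.
import Mathlib
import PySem

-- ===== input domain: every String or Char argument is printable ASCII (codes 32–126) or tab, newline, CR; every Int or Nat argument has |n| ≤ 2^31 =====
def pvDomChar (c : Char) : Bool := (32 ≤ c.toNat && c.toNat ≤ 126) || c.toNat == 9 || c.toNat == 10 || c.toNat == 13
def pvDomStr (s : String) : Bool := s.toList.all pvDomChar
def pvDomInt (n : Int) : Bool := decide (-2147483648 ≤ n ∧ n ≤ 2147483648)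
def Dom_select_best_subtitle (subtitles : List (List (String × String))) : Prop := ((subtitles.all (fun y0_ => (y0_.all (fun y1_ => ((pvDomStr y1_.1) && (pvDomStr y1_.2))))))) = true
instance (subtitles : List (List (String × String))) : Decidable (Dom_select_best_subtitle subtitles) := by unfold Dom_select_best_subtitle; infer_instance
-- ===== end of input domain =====

-- B replaces A's priority-outer/subtitle-inner nested scan (plus a separate fallback
-- return) by a rank key per subtitle and one stable min over the list (objective: simpler).

-- shared by both sources: the priority list, sub.get("lan",""), and the match test
def pvPriority : List String := ["zh-CN", "zh-Hans", "zh", "ai-zh", "en", "ai-en"]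

def pvLan (sub : List (String × String)) : String := (PySem.Dict.mk sub).getD "lan" ""

def pvMatches (lan lang : String) : Bool := lan == lang || PySem.Str.startswith lan lang

-- ===== PORT A =====
-- inner loop: 'for sub in subtitles: … return sub'
def pvFindA (lang : String) : List (List (String × String)) → Option (List (String × String))
  | [] => none
  | sub :: rest =>
      if pvMatches (pvLan sub) lang then some sub else pvFindA lang rest

-- outer loop: 'for lang in priority: …'
def pvLoopA (subtitles : List (List (String × String))) : List String → Option (List (String × String))
  | [] => none
  | lang :: rest =>
      match pvFindA lang subtitles with
      | some sub => some sub
      | none => pvLoopA subtitles rest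

def select_best_subtitle (subtitles : List (List (String × String))) : Option (List (String × String)) :=
  match subtitles with
  | [] => none
  | first :: _ =>
      match pvLoopA subtitles pvPriority with
      | some sub => some sub
      | none => some first   -- fallback to subtitles[0]

-- ===== PORT B =====
-- 'for i, lang in enumerate(priority): … return i' / 'return len(priority)'
def pvRankGo (lan : String) : List String → Nat → Nat
  | [], i => i
  | lang :: rest, i => if pvMatches lan lang then i else pvRankGo lan rest (i + 1)

def pvRank (sub : List (String × String)) : Nat := pvRankGo (pvLan sub) pvPriority 0

def select_best_subtitle_alt (subtitles : List (List (String × String))) : Option (List (String × String)) :=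
  if subtitles = [] then none
  else PySem.List.min? subtitles pvRank

-- ===== PRECONDITION & SPEC =====
def Spec_select_best_subtitle (subtitles : List (List (String × String))) (out : Option (List (String × String))) : Prop := out = select_best_subtitle_alt subtitles
instance (subtitles : List (List (String × String))) (out : Option (List (String × String))) : Decidable (Spec_select_best_subtitle subtitles out) := by unfold Spec_select_best_subtitle; infer_instance

-- ===== CLAIM (what is proved, stated in full; the proofs are below) =====
def Claim_equal_select_best_subtitle : Prop := ∀ (subtitles : List (List (String × String))), Dom_select_best_subtitle subtitles → Spec_select_best_subtitle subtitles (select_best_subtitle subtitles)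

-- ===== LEMMAS AND PROOFS =====

-- the fold step of PySem.List.min? for a Nat-valued key
def pvStep {α : Type} (key : α → Nat) (acc : Option α) (x : α) : Option α :=
  match acc with
  | none => some x
  | some m => if key x < key m then some x else some m

theorem pv_min?_eq_foldl {α : Type} (xs : List α) (key : α → Nat) :
    PySem.List.min? xs key = xs.foldl (pvStep key) none := rfl

theorem pv_foldl_stay {α : Type} (key : α → Nat) (t : List α) (m : α)
    (h : ∀ y ∈ t, ¬ key y < key m) : t.foldl (pvStep key) (some m) = some m := by
  induction t with
  | nil => rfl
  | cons y t ih =>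
      have hy : ¬ key y < key m := h y (by simp)
      simp only [List.foldl_cons, pvStep, if_neg hy]
      exact ih (fun z hz => h z (by simp [hz]))

theorem pv_foldl_zero_found {α : Type} (key : α → Nat) (t : List α) (s0 : α) :
    ∀ m, key m ≠ 0 → t.find? (fun y => key y == 0) = some s0 →
    t.foldl (pvStep key) (some m) = some s0 := by
  induction t with
  | nil => intro m _ h; simp at h
  | cons y t ih =>
      intro m hm h
      by_cases hy : key y = 0
      · have hs0 : y = s0 := by
          have := List.find?_cons_of_pos (p := fun y => key y == 0) (l := t) (by simpa using hy)
          rw [this] at h; exact Option.some.inj h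
        have hlt : key y < key m := by omega
        simp only [List.foldl_cons, pvStep, if_pos hlt]
        rw [pv_foldl_stay key t y (by intro z _; omega)]
        rw [hs0]
      · have hfind : t.find? (fun y => key y == 0) = some s0 := by
          have := List.find?_cons_of_neg (p := fun y => key y == 0) (l := t) (by simpa using hy)
          rw [this] at h; exact h
        simp only [List.foldl_cons, pvStep]
        by_cases hlt : key y < key m
        · rw [if_pos hlt]; exact ih y hy hfind
        · rw [if_neg hlt]; exact ih m hm hfind

theorem pv_min?_first_zero {α : Type} (key : α → Nat) (x : α) (t : List α) (s0 : α)
    (h : (x :: t).find? (fun y => key y == 0) = some s0) :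
    PySem.List.min? (x :: t) key = some s0 := by
  rw [pv_min?_eq_foldl]
  simp only [List.foldl_cons]
  have hstep : pvStep key none x = some x := rfl
  rw [hstep]
  by_cases hx : key x = 0
  · have hs0 : x = s0 := by
      have := List.find?_cons_of_pos (p := fun y => key y == 0) (l := t) (by simpa using hx)
      rw [this] at h; exact Option.some.inj h
    rw [pv_foldl_stay key t x (by intro z _; omega), hs0]
  · have hfind : t.find? (fun y => key y == 0) = some s0 := by
      have := List.find?_cons_of_neg (p := fun y => key y == 0) (l := t) (by simpa using hx)
      rw [this] at h; exact h
    exact pv_foldl_zero_found key t s0 x hx hfind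

theorem pv_foldl_shift {α : Type} (f g : α → Nat) (xs : List α) :
    ∀ m, f m = g m + 1 → (∀ a ∈ xs, f a = g a + 1) →
    xs.foldl (pvStep f) (some m) = xs.foldl (pvStep g) (some m) := by
  induction xs with
  | nil => intro m _ _; rfl
  | cons y t ih =>
      intro m hm h
      have hy : f y = g y + 1 := h y (by simp)
      have hiff : (f y < f m) = (g y < g m) := by rw [hy, hm]; simp
      simp only [List.foldl_cons, pvStep, hiff]
      by_cases hlt : g y < g m
      · simp only [if_pos hlt]; exact ih y hy (fun a ha => h a (by simp [ha]))
      · simp only [if_neg hlt]; exact ih m hm (fun a ha => h a (by simp [ha]))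

theorem pv_min?_shift {α : Type} (f g : α → Nat) (xs : List α)
    (h : ∀ a ∈ xs, f a = g a + 1) :
    PySem.List.min? xs f = PySem.List.min? xs g := by
  cases xs with
  | nil => rfl
  | cons x t =>
      rw [pv_min?_eq_foldl, pv_min?_eq_foldl]
      simp only [List.foldl_cons]
      have hx : pvStep f none x = some x := rfl
      have hx' : pvStep g none x = some x := rfl
      rw [hx, hx']
      exact pv_foldl_shift f g t x (h x (by simp)) (fun a ha => h a (by simp [ha]))

theorem pv_rankGo_succ (lan : String) (ps : List String) :
    ∀ n, pvRankGo lan ps (n + 1) = pvRankGo lan ps n + 1 := by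
  induction ps with
  | nil => intro n; rfl
  | cons p ps ih =>
      intro n
      simp only [pvRankGo]
      by_cases h : pvMatches lan p = true
      · rw [if_pos h, if_pos h]
      · rw [if_neg h, if_neg h]; exact ih (n + 1)

theorem pv_findA_eq_find? (lang : String) (xs : List (List (String × String))) :
    pvFindA lang xs = xs.find? (fun s => pvMatches (pvLan s) lang) := by
  induction xs with
  | nil => rfl
  | cons x t ih =>
      simp only [pvFindA, List.find?_cons]
      by_cases h : pvMatches (pvLan x) lang = true
      · simp [h]
      · simp only [Bool.not_eq_true] at h
        simp [h, ih]

-- key fact: the rank w.r.t. p :: ps is 0 exactly on subtitles matching p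
theorem pv_rank_zero_pred (p : String) (ps : List String) :
    (fun s => pvRankGo (pvLan s) (p :: ps) 0 == 0) = (fun s => pvMatches (pvLan s) p) := by
  funext s
  simp only [pvRankGo]
  by_cases h : pvMatches (pvLan s) p = true
  · simp [h]
  · simp only [Bool.not_eq_true] at h
    rw [if_neg (by simp [h]), pv_rankGo_succ]
    simp [h]

theorem pv_main (ps : List String) (x : List (String × String)) (t : List (List (String × String))) :
    (match pvLoopA (x :: t) ps with
     | some sub => some sub
     | none => some x) = PySem.List.min? (x :: t) (fun s => pvRankGo (pvLan s) ps 0) := by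
  induction ps with
  | nil =>
      simp only [pvLoopA, pvRankGo]
      rw [pv_min?_eq_foldl]
      simp only [List.foldl_cons]
      have hx : pvStep (fun (_ : List (String × String)) => 0) none x = some x := rfl
      rw [hx, pv_foldl_stay _ t x (by intro z _; omega)]
  | cons p ps ih =>
      simp only [pvLoopA, pv_findA_eq_find?]
      cases hfind : (x :: t).find? (fun s => pvMatches (pvLan s) p) with
      | some s0 =>
          rw [pv_min?_first_zero (fun s => pvRankGo (pvLan s) (p :: ps) 0) x t s0
            (by rw [pv_rank_zero_pred]; exact hfind)]
      | none =>
          have hnone : ∀ s ∈ (x :: t), pvMatches (pvLan s) p = false := by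
            intro s hs
            have := List.find?_eq_none.mp hfind s hs
            simpa using this
          have hshift : ∀ s ∈ (x :: t),
              pvRankGo (pvLan s) (p :: ps) 0 = pvRankGo (pvLan s) ps 0 + 1 := by
            intro s hs
            simp only [pvRankGo]
            rw [if_neg (by simp [hnone s hs]), pv_rankGo_succ]
          rw [pv_min?_shift _ _ _ hshift]
          exact ih

-- ===== VERDICT (by name: the statement is the Claim_ definition above) =====
theorem select_best_subtitle_spec : Claim_equal_select_best_subtitle := by
  intro subtitles _
  unfold Spec_select_best_subtitle select_best_subtitle select_best_subtitle_alt
  cases subtitles with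
  | nil => rfl
  | cons x t =>
      rw [if_neg (by simp)]
      exact pv_main pvPriority x t
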